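-- pv_equiv track=rewrite | github.com/Tao-Yida/CEDANet | src/download_videos.py | filter_by_label_criteria
-- ===== SOURCE A (Python) =====
-- def should_exclude_video(v):
--     """
--     Check if a video should be excluded based on label states.
--
--     Parameters
--     ----------
--     v : dict
--         The dictionary with keys and values in the video dataset JSON file.
--
--     Returns
--     -------
--     bool
--         True if video should be excluded, False otherwise.
--     """
--     # Exclude videos with poor quality (label_state or label_state_admin = -2)
--     if v.get("label_state", 0) == -2 or v.get("label_state_admin", 0) == -2:
--         return True
--     return False
--
-- def filter_by_label_criteria(data_dict, criteria="all"):
--     """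
--     Filter videos based on label criteria.
--
--     Parameters
--     ----------
--     data_dict : list
--         List of video dictionaries.
--     criteria : str
--         Filtering criteria:
--         - "all": Download all non-poor-quality videos (default)
--         - "high_confidence": Only high confidence samples (gold standard + strong agreement)
--         - "positive_only": Only positive samples (various confidence levels)
--         - "negative_only": Only negative samples (various confidence levels)
--         - "gold_standard": Only gold standard samples (47, 32)
--
--     Returns
--     -------
--     list
--         Filtered list of video dictionaries.
--     """
--     filtered_videos = []
--
--     for v in data_dict:
--         # Always exclude poor quality videos
--         if should_exclude_video(v):
--             continue
--
--         ls = v.get("label_state", -1)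
--         lsa = v.get("label_state_admin", -1)
--
--         if criteria == "all":
--             filtered_videos.append(v)
--         elif criteria == "high_confidence":
--             # Gold standard + strong agreement
--             if lsa in [47, 32, 23, 16]:
--                 filtered_videos.append(v)
--         elif criteria == "positive_only":
--             # All positive samples
--             if lsa in [47, 23] or ls in [47, 23, 19, 5]:
--                 filtered_videos.append(v)
--         elif criteria == "negative_only":
--             # All negative samples
--             if lsa in [32, 16] or ls in [32, 16, 20, 4]:
--                 filtered_videos.append(v)
--         elif criteria == "gold_standard":
--             # Only gold standard samples
--             if lsa in [47, 32]:
--                 filtered_videos.append(v)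
--
--     return filtered_videos
-- ===== SOURCE B (Python) =====
-- def _matching_criteria(v):
--     """List every criteria string under which this video is kept (empty for poor quality)."""
--     if v.get("label_state", 0) == -2 or v.get("label_state_admin", 0) == -2:
--         return []
--     ls = v.get("label_state", -1)
--     lsa = v.get("label_state_admin", -1)
--     tags = ["all"]
--     if lsa in (47, 32, 23, 16):
--         tags.append("high_confidence")
--     if lsa in (47, 23) or ls in (47, 23, 19, 5):
--         tags.append("positive_only")
--     if lsa in (32, 16) or ls in (32, 16, 20, 4):
--         tags.append("negative_only")
--     if lsa in (47, 32):
--         tags.append("gold_standard")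
--     return tags
--
--
-- def filter_by_label_criteria(data_dict, criteria="all"):
--     # video-centric: classify each video once, then select by membership of the criteria string
--     return [v for v in data_dict if criteria in _matching_criteria(v)]
-- ===== Notes on version B (the rewrite author's own statement) =====
-- stated objective: alternative
-- what changed: B inverts the decomposition: instead of dispatching on the criteria string with an if/elif chain per video, it classifies each video once into the list of all criteria under which it is kept (empty for poor-quality videos) and selects videos whose tag list contains the requested criteria string.
import Mathlib
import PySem

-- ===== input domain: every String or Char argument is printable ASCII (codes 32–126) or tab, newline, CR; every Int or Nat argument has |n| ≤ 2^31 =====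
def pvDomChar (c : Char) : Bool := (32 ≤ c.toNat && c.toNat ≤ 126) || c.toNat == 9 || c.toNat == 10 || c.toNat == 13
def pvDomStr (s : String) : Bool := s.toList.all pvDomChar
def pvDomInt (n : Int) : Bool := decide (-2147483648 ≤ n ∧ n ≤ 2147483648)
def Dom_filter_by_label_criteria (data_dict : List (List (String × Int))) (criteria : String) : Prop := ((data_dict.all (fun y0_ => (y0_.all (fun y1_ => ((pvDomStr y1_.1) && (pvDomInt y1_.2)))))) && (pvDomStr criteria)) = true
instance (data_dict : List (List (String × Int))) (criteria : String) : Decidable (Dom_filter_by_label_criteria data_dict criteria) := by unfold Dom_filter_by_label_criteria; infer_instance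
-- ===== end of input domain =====

-- B inverts the decomposition: it classifies each video once into the list of all criteria
-- under which it is kept and selects by membership of the criteria string (objective: alternative).


-- ===== PORT A =====
-- v.get(k, d) on the association list (first match)
def pvGet (v : List (String × Int)) (k : String) (d : Int) : Int :=
  match v.find? (fun p => p.1 == k) with
  | some p => p.2
  | none => d

def should_exclude_video (v : List (String × Int)) : Bool :=
  pvGet v "label_state" 0 == -2 || pvGet v "label_state_admin" 0 == -2

def filter_by_label_criteria (data_dict : List (List (String × Int))) (criteria : String) : List (List (String × Int)) :=
  data_dict.foldl (fun filtered_videos v =>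
    if should_exclude_video v then filtered_videos
    else
      let ls := pvGet v "label_state" (-1)
      let lsa := pvGet v "label_state_admin" (-1)
      if criteria == "all" then filtered_videos ++ [v]
      else if criteria == "high_confidence" then
        if lsa == 47 || lsa == 32 || lsa == 23 || lsa == 16 then filtered_videos ++ [v] else filtered_videos
      else if criteria == "positive_only" then
        if (lsa == 47 || lsa == 23) || (ls == 47 || ls == 23 || ls == 19 || ls == 5) then filtered_videos ++ [v] else filtered_videos
      else if criteria == "negative_only" then
        if (lsa == 32 || lsa == 16) || (ls == 32 || ls == 16 || ls == 20 || ls == 4) then filtered_videos ++ [v] else filtered_videos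
      else if criteria == "gold_standard" then
        if lsa == 47 || lsa == 32 then filtered_videos ++ [v] else filtered_videos
      else filtered_videos) []

-- ===== PORT B =====
-- Source B's _matching_criteria: the list of criteria strings under which this video is kept
def matching_criteria (v : List (String × Int)) : List String :=
  if pvGet v "label_state" 0 == -2 || pvGet v "label_state_admin" 0 == -2 then []
  else
    let ls := pvGet v "label_state" (-1)
    let lsa := pvGet v "label_state_admin" (-1)
    ["all"]
    ++ (if lsa == 47 || lsa == 32 || lsa == 23 || lsa == 16 then ["high_confidence"] else [])
    ++ (if (lsa == 47 || lsa == 23) || (ls == 47 || ls == 23 || ls == 19 || ls == 5) then ["positive_only"] else [])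
    ++ (if (lsa == 32 || lsa == 16) || (ls == 32 || ls == 16 || ls == 20 || ls == 4) then ["negative_only"] else [])
    ++ (if lsa == 47 || lsa == 32 then ["gold_standard"] else [])

def filter_by_label_criteria_alt (data_dict : List (List (String × Int))) (criteria : String) : List (List (String × Int)) :=
  data_dict.filter (fun v => (matching_criteria v).contains criteria)

-- ===== PRECONDITION & SPEC =====
def Spec_filter_by_label_criteria (data_dict : List (List (String × Int))) (criteria : String) (out : List (List (String × Int))) : Prop := out = filter_by_label_criteria_alt data_dict criteria
instance (data_dict : List (List (String × Int))) (criteria : String) (out : List (List (String × Int))) : Decidable (Spec_filter_by_label_criteria data_dict criteria out) := by unfold Spec_filter_by_label_criteria; infer_instance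

-- ===== CLAIM (what is proved, stated in full; the proofs are below) =====
def Claim_equal_filter_by_label_criteria : Prop := ∀ (data_dict : List (List (String × Int))) (criteria : String), Dom_filter_by_label_criteria data_dict criteria → Spec_filter_by_label_criteria data_dict criteria (filter_by_label_criteria data_dict criteria)

-- ===== LEMMAS AND PROOFS =====

-- A's per-video decision for one fixed criteria equals membership of criteria in B's tag list
set_option maxHeartbeats 1000000 in
theorem bodyA_eq (criteria : String) :
    (fun (filtered_videos : List (List (String × Int))) v =>
      if should_exclude_video v then filtered_videos
      else
        let ls := pvGet v "label_state" (-1)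
        let lsa := pvGet v "label_state_admin" (-1)
        if criteria == "all" then filtered_videos ++ [v]
        else if criteria == "high_confidence" then
          if lsa == 47 || lsa == 32 || lsa == 23 || lsa == 16 then filtered_videos ++ [v] else filtered_videos
        else if criteria == "positive_only" then
          if (lsa == 47 || lsa == 23) || (ls == 47 || ls == 23 || ls == 19 || ls == 5) then filtered_videos ++ [v] else filtered_videos
        else if criteria == "negative_only" then
          if (lsa == 32 || lsa == 16) || (ls == 32 || ls == 16 || ls == 20 || ls == 4) then filtered_videos ++ [v] else filtered_videos
        else if criteria == "gold_standard" then
          if lsa == 47 || lsa == 32 then filtered_videos ++ [v] else filtered_videos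
        else filtered_videos)
    = (fun acc v => if (matching_criteria v).contains criteria then acc ++ [v] else acc) := by
  funext acc v
  simp only [matching_criteria, should_exclude_video]
  split_ifs <;> simp_all [List.contains_eq_mem]

theorem filter_eq (data_dict : List (List (String × Int))) (criteria : String) :
    filter_by_label_criteria data_dict criteria = filter_by_label_criteria_alt data_dict criteria := by
  unfold filter_by_label_criteria filter_by_label_criteria_alt
  rw [bodyA_eq criteria]
  rw [show (fun (acc : List (List (String × Int))) v => if (matching_criteria v).contains criteria = true then acc ++ [v] else acc)
        = (fun acc v => if (matching_criteria v).contains criteria = true then acc ++ [id v] else acc) from rfl,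
      PySem.List.foldl_append_if]
  simp

-- ===== VERDICT (by name: the statement is the Claim_ definition above) =====
theorem filter_by_label_criteria_spec : Claim_equal_filter_by_label_criteria := by
  intro dd c _
  exact filter_eq dd c
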